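-- pv_equiv track=rewrite | github.com/parkjisu6239/2021_APS | NonSWEA/p_GNS/s2.py | Weird_numbers_sort
-- ===== SOURCE A (Python) =====
-- def Weird_numbers_sort(N, Weird_numbers):
--     num_list = ["ZRO", "ONE", "TWO", "THR", "FOR", "FIV", "SIX", "SVN", "EGT", "NIN"]
--     count_dict = dict()
--     for num_str in num_list:
--         count_dict[num_str] = 0
--
--     for Weird_number in Weird_numbers:
--         count_dict[Weird_number] = count_dict.get(Weird_number, 0) + 1
--
--     sorted_Weird_numbers = []
--     for key, val in count_dict.items():
--         for _ in range(val):
--             sorted_Weird_numbers.append(key)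
--
--     return ' '.join(sorted_Weird_numbers)
-- ===== SOURCE B (Python) =====
-- def Weird_numbers_sort(N, Weird_numbers):
--     num_list = ["ZRO", "ONE", "TWO", "THR", "FOR", "FIV", "SIX", "SVN", "EGT", "NIN"]
--     rank = {}
--     for w in num_list:
--         rank[w] = len(rank)
--     for w in Weird_numbers:
--         if w not in rank:
--             rank[w] = len(rank)
--     return ' '.join(sorted(Weird_numbers, key=lambda w: rank[w]))
-- ===== Notes on version B (the rewrite author's own statement) =====
-- stated objective: idiomatic
-- what changed: B replaces A's counting-dict-then-bucket-expansion with a rank dictionary (known words 0-9, unknown words 10+ in first-seen order) and a single stable sorted(..., key=rank) plus join.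
import Mathlib
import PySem

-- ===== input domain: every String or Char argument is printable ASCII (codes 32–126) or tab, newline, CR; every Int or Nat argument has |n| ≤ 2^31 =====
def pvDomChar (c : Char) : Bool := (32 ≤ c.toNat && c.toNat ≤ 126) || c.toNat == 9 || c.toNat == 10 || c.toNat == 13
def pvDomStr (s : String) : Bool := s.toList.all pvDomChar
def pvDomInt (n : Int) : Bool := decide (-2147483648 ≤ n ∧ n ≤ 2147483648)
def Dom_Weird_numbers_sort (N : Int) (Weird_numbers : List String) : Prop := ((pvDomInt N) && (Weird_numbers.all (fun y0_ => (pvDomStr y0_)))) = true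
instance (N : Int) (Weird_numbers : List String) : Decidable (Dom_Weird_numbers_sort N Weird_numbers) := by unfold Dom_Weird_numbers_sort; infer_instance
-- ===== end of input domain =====

-- B replaces A's counting-dict bucket expansion by a rank dictionary plus one stable key-sort (alternative algorithm, same cost class).

-- ===== PORT A =====
def Weird_numbers_sort (N : Int) (Weird_numbers : List String) : String :=
  let num_list : List String := ["ZRO", "ONE", "TWO", "THR", "FOR", "FIV", "SIX", "SVN", "EGT", "NIN"]
  let count_dict : PySem.Dict String Int :=
    num_list.foldl (fun d num_str => d.insert num_str 0) PySem.Dict.empty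
  let count_dict :=
    Weird_numbers.foldl (fun d w => d.insert w (d.getD w 0 + 1)) count_dict
  let sorted_Weird_numbers : List String :=
    count_dict.items.foldl
      (fun acc kv => (PySem.List.pyRange 0 kv.2 1).foldl (fun a _ => a ++ [kv.1]) acc) []
  PySem.Str.join " " sorted_Weird_numbers

-- ===== PORT B =====
-- rank[w] in the sort key is ported as getD _ 0: every element of Weird_numbers was given a rank
-- by the loop above it, so the Python lookup never raises and getD is exact there.
def Weird_numbers_sort_alt (N : Int) (Weird_numbers : List String) : String :=
  let num_list : List String := ["ZRO", "ONE", "TWO", "THR", "FOR", "FIV", "SIX", "SVN", "EGT", "NIN"]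
  let rank : PySem.Dict String Int :=
    num_list.foldl (fun d w => d.insert w (d.size : Int)) PySem.Dict.empty
  let rank :=
    Weird_numbers.foldl (fun d w => if d.contains w then d else d.insert w (d.size : Int)) rank
  PySem.Str.join " " (PySem.List.sorted Weird_numbers (fun w => rank.getD w 0) false)

-- ===== PRECONDITION & SPEC =====
def Spec_Weird_numbers_sort (N : Int) (Weird_numbers : List String) (out : String) : Prop := out = Weird_numbers_sort_alt N Weird_numbers
instance (N : Int) (Weird_numbers : List String) (out : String) : Decidable (Spec_Weird_numbers_sort N Weird_numbers out) := by unfold Spec_Weird_numbers_sort; infer_instance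

-- ===== CLAIM (what is proved, stated in full; the proofs are below) =====
def Claim_equal_Weird_numbers_sort : Prop := ∀ (N : Int) (Weird_numbers : List String), Dom_Weird_numbers_sort N Weird_numbers → Spec_Weird_numbers_sort N Weird_numbers (Weird_numbers_sort N Weird_numbers)

-- ===== LEMMAS AND PROOFS =====

-- the ten known words
def pvNumList : List String := ["ZRO", "ONE", "TWO", "THR", "FOR", "FIV", "SIX", "SVN", "EGT", "NIN"]

-- the key order both programs share: known words first, then unknown words in first-seen order
def pvKeys (xs : List String) : List String := PySem.Set.update pvNumList xs

-- the canonical result list both programs produce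
def pvSorted (xs : List String) : List String :=
  (pvKeys xs).flatMap (fun k => List.replicate (xs.count k) k)

-- ---------- A-side ----------

def pvInitA : PySem.Dict String Int := pvNumList.foldl (fun d k => d.insert k 0) PySem.Dict.empty

theorem initA_getD (k : String) : pvInitA.getD k 0 = 0 := by
  have : pvInitA = PySem.Dict.mk [("ZRO",0),("ONE",0),("TWO",0),("THR",0),("FOR",0),("FIV",0),("SIX",0),("SVN",0),("EGT",0),("NIN",0)] := by decide
  rw [this]; simp [PySem.Dict.getD_eq_get?_getD, PySem.Dict.get?_mk_cons]; split_ifs <;> rfl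

def pvCountA (xs : List String) : PySem.Dict String Int :=
  xs.foldl (fun d w => d.insert w (d.getD w 0 + 1)) pvInitA

theorem countA_keys (xs : List String) : (pvCountA xs).keys = pvKeys xs := by
  have h := PySem.Dict.keys_foldl_insert xs (fun d x => d.getD x 0 + 1) pvInitA
  have hk : pvInitA.keys = pvNumList := by decide
  simpa [pvCountA, pvKeys, hk] using h

theorem countA_keys_nodup (xs : List String) : (pvCountA xs).keys.Nodup :=
  PySem.Dict.nodup_keys_foldl_insert xs _ pvInitA (by decide)

theorem pvKeys_nodup (xs : List String) : (pvKeys xs).Nodup :=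
  countA_keys xs ▸ countA_keys_nodup xs

theorem countA_getD (xs : List String) (v : String) : (pvCountA xs).getD v 0 = (xs.count v : Int) := by
  have h := PySem.Dict.getD_foldl_insert_add_one xs pvInitA (v := v)
  simpa [pvCountA, initA_getD] using h

theorem countA_items (xs : List String) :
    (pvCountA xs).items = (pvKeys xs).map (fun k => (k, (xs.count k : Int))) := by
  have h := PySem.Dict.items_eq_map_keys (pvCountA xs) (countA_keys_nodup xs) 0
  rw [h, countA_keys]
  exact List.map_congr_left (fun k _ => by rw [countA_getD])

theorem pv_len_range (v : Int) : (PySem.List.pyRange 0 v 1).length = v.toNat := by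
  rw [PySem.List.pyRange_of_pos 0 v (s := 1) (by norm_num)]
  simp; omega

theorem inner_rep (k : String) (v : Int) (acc : List String) :
    (PySem.List.pyRange 0 v 1).foldl (fun a _ => a ++ [k]) acc = acc ++ List.replicate v.toNat k := by
  have h := PySem.List.foldl_append_singleton_eq_map (fun _ => k) (PySem.List.pyRange 0 v 1) acc
  rw [h, List.map_const', pv_len_range]

theorem expand_eq (its : List (String × Int)) :
    its.foldl (fun acc kv => (PySem.List.pyRange 0 kv.2 1).foldl (fun a _ => a ++ [kv.1]) acc) [] =
      its.flatMap (fun kv => List.replicate kv.2.toNat kv.1) := by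
  simp only [inner_rep]
  simpa using PySem.List.foldl_append_eq_flatMap (fun kv : String × Int => List.replicate kv.2.toNat kv.1) its []

theorem A_eq_canonical (N : Int) (xs : List String) :
    Weird_numbers_sort N xs = PySem.Str.join " " (pvSorted xs) := by
  show PySem.Str.join " " ((pvCountA xs).items.foldl _ []) = _
  rw [expand_eq, countA_items, List.flatMap_map, pvSorted]
  simp

-- ---------- B-side ----------

-- the rank dict as an items list: word i of E ↦ i
def pvEnum (E : List String) : List (String × Int) :=
  E.zipIdx.map (fun p => (p.1, (p.2 : Int)))

theorem pvEnum_fst (E : List String) : (pvEnum E).map Prod.fst = E := by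
  simp [pvEnum, Function.comp_def]

theorem pvEnum_append_one (E : List String) (w : String) :
    pvEnum (E ++ [w]) = pvEnum E ++ [(w, (E.length : Int))] := by
  simp [pvEnum, List.zipIdx_append]

theorem rank_fold (l : List String) : ∀ (E : List String),
    l.foldl (fun d w => if d.contains w then d else d.insert w (d.size : Int))
        (PySem.Dict.mk (pvEnum E))
      = PySem.Dict.mk (pvEnum (PySem.Set.update E l)) := by
  induction l with
  | nil => intro E; rfl
  | cons w l ih =>
    intro E
    have hcont : (PySem.Dict.mk (pvEnum E)).contains w = decide (w ∈ E) := by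
      rw [PySem.Dict.contains_eq_decide_mem_keys]
      simp [PySem.Dict.keys, pvEnum_fst]
    by_cases hw : w ∈ E
    · have hupd : PySem.Set.update E (w :: l) = PySem.Set.update E l := by
        simp [PySem.Set.update, List.foldl_cons, PySem.Set.add, hw]
      rw [hupd, ← ih E]
      simp [List.foldl_cons, hcont, hw]
    · have hadd : PySem.Set.update E (w :: l) = PySem.Set.update (E ++ [w]) l := by
        simp [PySem.Set.update, List.foldl_cons, PySem.Set.add, hw]
      rw [hadd, ← ih (E ++ [w])]
      have hins : (PySem.Dict.mk (pvEnum E)).insert w ((PySem.Dict.mk (pvEnum E)).size : Int)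
          = PySem.Dict.mk (pvEnum (E ++ [w])) := by
        have h1 : (PySem.Dict.mk (pvEnum E)).contains w = false := by simp [hcont, hw]
        rw [PySem.Dict.ext_iff]
        rw [PySem.Dict.items_insert_of_not_contains _ _ h1]
        have hsz : (PySem.Dict.mk (pvEnum E)).size = E.length := by
          simp [PySem.Dict.size, pvEnum]
        simp [hsz, pvEnum_append_one]
      simp only [List.foldl_cons, hcont, hw, decide_false, Bool.false_eq_true, if_false, hins]

theorem rank_getD (K : List String) (hnd : K.Nodup) (w : String) (hw : w ∈ K) :
    (PySem.Dict.mk (pvEnum K)).getD w 0 = (K.idxOf w : Int) := by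
  apply PySem.Dict.getD_of_mem_items
  · have hlt : K.idxOf w < K.length := List.idxOf_lt_length_of_mem hw
    have : (w, K.idxOf w) ∈ K.zipIdx := by
      apply List.mem_zipIdx_iff_getElem?.mpr
      rw [List.getElem?_eq_getElem hlt, List.getElem_idxOf hlt]
    simpa [pvEnum] using List.mem_map_of_mem (f := fun p : String × Nat => (p.1, (p.2 : Int))) this
  · simpa [PySem.Dict.keys, pvEnum_fst] using hnd

-- uniqueness of an ordered arrangement when equal keys force equal elements
theorem stable_unique {α : Type} (key : α → Int) : ∀ (ys zs : List α), ys.Perm zs →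
    ys.Pairwise (fun a b => key a ≤ key b) → zs.Pairwise (fun a b => key a ≤ key b) →
    (∀ a ∈ ys, ∀ b ∈ ys, key a = key b → a = b) → ys = zs := by
  intro ys
  induction ys with
  | nil => intro zs hp _ _ _; exact (hp.nil_eq).symm ▸ rfl
  | cons y ys ih =>
    intro zs hp hpy hpz hinj
    cases zs with
    | nil => exact absurd hp.symm.nil_eq (by simp)
    | cons z zs =>
      have hzmem : z ∈ y :: ys := hp.mem_iff.mpr (by simp)
      have hymem : y ∈ z :: zs := hp.mem_iff.mp (by simp)
      have hyz : y = z := by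
        rcases List.mem_cons.mp hzmem with h | h
        · exact h.symm
        rcases List.mem_cons.mp hymem with h' | h'
        · exact h'
        have h1 : key y ≤ key z := List.rel_of_pairwise_cons hpy h
        have h2 : key z ≤ key y := List.rel_of_pairwise_cons hpz h'
        exact hinj y (by simp) z hzmem (le_antisymm h1 h2)
      subst hyz
      have := ih zs hp.cons_inv (List.Pairwise.of_cons hpy) (List.Pairwise.of_cons hpz)
        (fun a ha b hb h => hinj a (by simp [ha]) b (by simp [hb]) h)
      rw [this]

theorem count_flatMap (c : String → Nat) : ∀ (K : List String), K.Nodup → ∀ v : String,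
    (K.flatMap (fun k => List.replicate (c k) k)).count v = if v ∈ K then c v else 0 := by
  intro K
  induction K with
  | nil => simp
  | cons k K ih =>
    intro hnd v
    rcases List.nodup_cons.mp hnd with ⟨hk, hnd'⟩
    rw [List.flatMap_cons, List.count_append, List.count_replicate, ih hnd' v]
    by_cases hv : v = k
    · subst hv; simp [hk]
    · simp [hv, Ne.symm hv]

theorem pairwise_flat (c : String → Nat) : ∀ (K : List String), K.Nodup →
    (K.flatMap (fun k => List.replicate (c k) k)).Pairwise
      (fun a b => ((K.idxOf a : Nat) : Int) ≤ (K.idxOf b : Nat)) := by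
  intro K
  induction K with
  | nil => simp
  | cons k K ih =>
    intro hnd
    rcases List.nodup_cons.mp hnd with ⟨hk, hnd'⟩
    rw [List.flatMap_cons, List.pairwise_append]
    refine ⟨?_, ?_, ?_⟩
    · exact List.pairwise_replicate.mpr (Or.inr (le_refl _))
    · refine (ih hnd').imp_of_mem ?_
      intro a b ha hb h
      have hmema : a ∈ K := by
        rcases List.mem_flatMap.mp ha with ⟨x, hx, hax⟩
        exact (List.eq_of_mem_replicate hax) ▸ hx
      have hmemb : b ∈ K := by
        rcases List.mem_flatMap.mp hb with ⟨x, hx, hbx⟩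
        exact (List.eq_of_mem_replicate hbx) ▸ hx
      have hna : a ≠ k := fun e => hk (e ▸ hmema)
      have hnb : b ≠ k := fun e => hk (e ▸ hmemb)
      rw [List.idxOf_cons_ne _ (Ne.symm hna), List.idxOf_cons_ne _ (Ne.symm hnb)]
      push_cast
      omega
    · intro a ha b hb
      have hak : a = k := List.eq_of_mem_replicate ha
      subst hak
      simp [List.idxOf_cons_self]

theorem mem_of_mem_flat (K : List String) (c : String → Nat) (a : String)
    (ha : a ∈ K.flatMap (fun k => List.replicate (c k) k)) : a ∈ K := by
  rcases List.mem_flatMap.mp ha with ⟨x, hx, hax⟩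
  exact (List.eq_of_mem_replicate hax) ▸ hx

theorem B_eq_canonical (N : Int) (xs : List String) :
    Weird_numbers_sort_alt N xs = PySem.Str.join " " (pvSorted xs) := by
  have hinit : (pvNumList.foldl (fun d w => d.insert w (d.size : Int)) PySem.Dict.empty)
      = PySem.Dict.mk (pvEnum pvNumList) := by decide
  show PySem.Str.join " " (PySem.List.sorted xs
      (fun w => (xs.foldl (fun d w => if d.contains w then d else d.insert w (d.size : Int))
        (["ZRO", "ONE", "TWO", "THR", "FOR", "FIV", "SIX", "SVN", "EGT", "NIN"].foldl
          (fun d w => d.insert w (d.size : Int)) PySem.Dict.empty)).getD w 0) false) = _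
  have hnl : (["ZRO", "ONE", "TWO", "THR", "FOR", "FIV", "SIX", "SVN", "EGT", "NIN"] : List String) = pvNumList := rfl
  rw [hnl, hinit, rank_fold]
  set K := PySem.Set.update pvNumList xs with hK
  have hKeq : K = pvKeys xs := rfl
  have hnd : K.Nodup := hKeq ▸ pvKeys_nodup xs
  set key : String → Int := fun w => (PySem.Dict.mk (pvEnum K)).getD w 0 with hkeydef
  have hkey : ∀ w ∈ K, key w = (K.idxOf w : Int) := fun w hw => rank_getD K hnd w hw
  have hmemxs : ∀ w ∈ xs, w ∈ K := fun w hw => (PySem.Set.mem_update pvNumList xs w).mpr (Or.inr hw)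
  congr 1
  apply Eq.symm
  apply stable_unique key
  · -- pvSorted xs ~ sorted
    have h1 : (pvSorted xs).Perm xs := by
      apply List.perm_iff_count.mpr
      intro v
      rw [pvSorted, count_flatMap (fun k => xs.count k) (pvKeys xs) (pvKeys_nodup xs) v]
      by_cases hv : v ∈ pvKeys xs
      · simp [hv]
      · have : v ∉ xs := fun h => hv (hmemxs v h)
        simp [hv, List.count_eq_zero_of_not_mem this]
    exact h1.trans (PySem.List.sorted_perm xs key false).symm
  · -- pairwise on the canonical list
    refine (pairwise_flat (fun k => xs.count k) (pvKeys xs) (pvKeys_nodup xs)).imp_of_mem ?_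
    intro a b ha hb h
    rw [hkey a (hKeq ▸ mem_of_mem_flat _ _ a ha), hkey b (hKeq ▸ mem_of_mem_flat _ _ b hb)]
    exact_mod_cast h
  · exact PySem.List.sorted_pairwise xs key
  · intro a ha b hb h
    have haK : a ∈ K := hKeq ▸ mem_of_mem_flat _ _ a ha
    have hbK : b ∈ K := hKeq ▸ mem_of_mem_flat _ _ b hb
    rw [hkey a haK, hkey b hbK] at h
    have hidx : K.idxOf a = K.idxOf b := by exact_mod_cast h
    exact (List.idxOf_inj haK).mp hidx

-- ===== VERDICT (by name: the statement is the Claim_ definition above) =====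
theorem Weird_numbers_sort_spec : Claim_equal_Weird_numbers_sort := by
  intro N xs _
  unfold Spec_Weird_numbers_sort
  rw [A_eq_canonical, B_eq_canonical]
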